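-- pv_equiv track=rewrite | github.com/dkvhr/ctf-archive | bsides/for.py | decode_base_65536
-- ===== SOURCE A (Python) =====
-- def decode_base_65536(encoded_string):
--     base = 65536
--     decoded_value = 0
--
--     for char in encoded_string:
--         decoded_value = decoded_value * base + ord(char)
--
--     decoded_string = ""
--     while decoded_value > 0:
--         decoded_string = chr(decoded_value % 256) + decoded_string
--         decoded_value //= 256
--
--     return decoded_string
-- ===== SOURCE B (Python) =====
-- def decode_base_65536(encoded_string):
--     # O(n): each base-65536 digit is exactly two base-256 bytes (hi, lo);
--     # stripping leading zero bytes reproduces the big-int conversion.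
--     out = []
--     for ch in encoded_string:
--         hi, lo = divmod(ord(ch), 256)
--         out.append(chr(hi))
--         out.append(chr(lo))
--     i = 0
--     while i < len(out) and out[i] == '\x00':
--         i += 1
--     return ''.join(out[i:])
-- ===== Notes on version B (the rewrite author's own statement) =====
-- stated objective: faster
-- what changed: Replaced the quadratic big-integer accumulate-then-extract (O(n) multiplications on an O(n)-digit number plus front-prepending string build) with a single linear pass that emits the two base-256 bytes (hi, lo) of each character and then strips the leading zero bytes.
import Mathlib
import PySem

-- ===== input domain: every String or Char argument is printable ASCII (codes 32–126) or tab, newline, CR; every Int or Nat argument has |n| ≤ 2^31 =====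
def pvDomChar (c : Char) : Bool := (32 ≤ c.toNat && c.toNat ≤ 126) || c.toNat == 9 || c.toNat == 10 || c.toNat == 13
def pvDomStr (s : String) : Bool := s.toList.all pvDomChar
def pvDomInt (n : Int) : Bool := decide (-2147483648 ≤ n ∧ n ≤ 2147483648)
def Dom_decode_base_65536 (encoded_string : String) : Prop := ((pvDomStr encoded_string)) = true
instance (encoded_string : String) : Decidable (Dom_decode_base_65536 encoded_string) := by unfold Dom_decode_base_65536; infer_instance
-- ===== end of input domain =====

-- B replaces A's quadratic big-integer accumulation with a linear two-bytes-per-char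
-- expansion followed by stripping leading zero bytes (objective: faster, asymptotic).

-- ===== PORT A =====
-- the while loop: decoded_string = chr(v % 256) + decoded_string; v //= 256
def pvDecodeWhile (v : Int) (acc : List Char) : List Char :=
  if h : 0 < v then
    pvDecodeWhile (PySem.Int.floordiv v 256) (Char.ofNat (PySem.Int.mod v 256).toNat :: acc)
  else acc
termination_by v.toNat
decreasing_by
  have h2 : PySem.Int.floordiv v 256 = v / 256 := PySem.Int.floordiv_eq_ediv_of_pos (by omega)
  rw [h2]; omega

def decode_base_65536 (encoded_string : String) : String :=
  let decoded_value := encoded_string.toList.foldl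
    (fun acc c => acc * 65536 + (c.toNat : Int)) 0
  String.mk (pvDecodeWhile decoded_value [])

-- ===== PORT B =====
def decode_base_65536_alt (encoded_string : String) : String :=
  let out := encoded_string.toList.flatMap
    (fun c => [Char.ofNat (c.toNat / 256), Char.ofNat (c.toNat % 256)])
  String.mk (out.dropWhile (fun c => c == Char.ofNat 0))

-- ===== PRECONDITION & SPEC =====
def Spec_decode_base_65536 (encoded_string : String) (out : String) : Prop := out = decode_base_65536_alt encoded_string
instance (encoded_string : String) (out : String) : Decidable (Spec_decode_base_65536 encoded_string out) := by unfold Spec_decode_base_65536; infer_instance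

-- ===== CLAIM (what is proved, stated in full; the proofs are below) =====
def Claim_equal_decode_base_65536 : Prop := ∀ (encoded_string : String), Dom_decode_base_65536 encoded_string → Spec_decode_base_65536 encoded_string (decode_base_65536 encoded_string)

-- ===== LEMMAS AND PROOFS =====

-- the accumulator of the while loop is just appended to the result
theorem pvDecodeWhile_acc_aux (n : Nat) :
    ∀ (v : Int), v.toNat ≤ n → ∀ acc, pvDecodeWhile v acc = pvDecodeWhile v [] ++ acc := by
  induction n with
  | zero =>
      intro v hv acc
      have hnp : ¬ 0 < v := by omega
      conv_lhs => rw [pvDecodeWhile.eq_def]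
      conv_rhs => rw [pvDecodeWhile.eq_def]
      simp [dif_neg hnp]
  | succ n ih =>
      intro v hv acc
      by_cases h : 0 < v
      · have hfd : PySem.Int.floordiv v 256 = v / 256 :=
          PySem.Int.floordiv_eq_ediv_of_pos (by omega)
        have hlt : (PySem.Int.floordiv v 256).toNat ≤ n := by rw [hfd]; omega
        conv_lhs => rw [pvDecodeWhile.eq_def]
        conv_rhs => rw [pvDecodeWhile.eq_def]
        simp only [dif_pos h]
        rw [ih _ hlt, ih _ hlt (Char.ofNat (PySem.Int.mod v 256).toNat :: [])]
        simp
      · conv_lhs => rw [pvDecodeWhile.eq_def]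
        conv_rhs => rw [pvDecodeWhile.eq_def]
        simp [dif_neg h]

theorem pvDecodeWhile_acc (v : Int) (acc : List Char) :
    pvDecodeWhile v acc = pvDecodeWhile v [] ++ acc :=
  pvDecodeWhile_acc_aux v.toNat v (le_refl _) acc

theorem pvDecodeWhile_zero : pvDecodeWhile 0 [] = [] := by
  rw [pvDecodeWhile.eq_def]; simp

-- one ASCII digit with a positive prefix appends its two bytes (hi byte = 0)
theorem pvDecodeWhile_step (v : Int) (c : Char) (hv : 0 < v) (hc : c.toNat < 256) :
    pvDecodeWhile (v * 65536 + (c.toNat : Int)) [] =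
      pvDecodeWhile v [] ++ [Char.ofNat 0, c] := by
  have hc0 : (0 : Int) ≤ (c.toNat : Int) := by positivity
  have hw : 0 < v * 65536 + (c.toNat : Int) := by nlinarith
  have hfd1 : PySem.Int.floordiv (v * 65536 + (c.toNat : Int)) 256 = v * 256 := by
    rw [PySem.Int.floordiv_eq_ediv_of_pos (by omega)]
    omega
  have hmod1 : PySem.Int.mod (v * 65536 + (c.toNat : Int)) 256 = (c.toNat : Int) := by
    rw [PySem.Int.mod_eq_emod_of_pos (by omega)]
    omega
  have hv2 : 0 < v * 256 := by positivity
  have hfd2 : PySem.Int.floordiv (v * 256) 256 = v := by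
    rw [PySem.Int.floordiv_eq_ediv_of_pos (by omega)]
    omega
  have hmod2 : PySem.Int.mod (v * 256) 256 = 0 := by
    rw [PySem.Int.mod_eq_emod_of_pos (by omega)]
    omega
  conv_lhs => rw [pvDecodeWhile.eq_def]
  simp only [dif_pos hw, hfd1, hmod1]
  conv_lhs => rw [pvDecodeWhile.eq_def]
  simp only [dif_pos hv2, hfd2, hmod2]
  rw [pvDecodeWhile_acc]
  simp [Char.ofNat_toNat]

-- the bottom of the big-int accumulation: a single char in (0, 256)
theorem pvDecodeWhile_single (c : Char) (h0 : 0 < c.toNat) (hc : c.toNat < 256) :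
    pvDecodeWhile ((c.toNat : Int)) [] = [c] := by
  have hp : (0 : Int) < (c.toNat : Int) := by exact_mod_cast h0
  have hfd : PySem.Int.floordiv ((c.toNat : Int)) 256 = 0 := by
    rw [PySem.Int.floordiv_eq_ediv_of_pos (by omega)]
    omega
  have hmod : PySem.Int.mod ((c.toNat : Int)) 256 = (c.toNat : Int) := by
    rw [PySem.Int.mod_eq_emod_of_pos (by omega)]
    omega
  conv_lhs => rw [pvDecodeWhile.eq_def]
  simp only [dif_pos hp, hfd, hmod]
  rw [pvDecodeWhile_acc, pvDecodeWhile_zero]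
  simp [Char.ofNat_toNat]

-- main invariant: folding more digits onto a positive value appends their byte pairs
theorem pvFold_decode (cs : List Char) (h : ∀ c ∈ cs, c.toNat < 256) :
    ∀ v : Int, 0 < v →
    pvDecodeWhile (cs.foldl (fun acc c => acc * 65536 + (c.toNat : Int)) v) [] =
      pvDecodeWhile v [] ++ cs.flatMap (fun c => [Char.ofNat 0, c]) := by
  induction cs with
  | nil => intro v hv; simp
  | cons c cs ih =>
      intro v hv
      have hc : c.toNat < 256 := h c (by simp)
      have hw : 0 < v * 65536 + (c.toNat : Int) := by nlinarith [Int.natCast_nonneg c.toNat]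
      simp only [List.foldl_cons]
      rw [ih (fun d hd => h d (by simp [hd])) _ hw, pvDecodeWhile_step v c hv hc]
      simp

theorem asciiChar_bounds (c : Char) (h : pvDomChar c = true) :
    0 < c.toNat ∧ c.toNat < 256 := by
  simp only [pvDomChar, Bool.or_eq_true, Bool.and_eq_true, decide_eq_true_eq, beq_iff_eq] at h
  omega

-- ===== VERDICT (by name: the statement is the Claim_ definition above) =====
theorem decode_base_65536_spec : Claim_equal_decode_base_65536 := by
  intro s hdom
  unfold Spec_decode_base_65536 decode_base_65536 decode_base_65536_alt
  have hall : ∀ c ∈ s.toList, 0 < c.toNat ∧ c.toNat < 256 := by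
    intro c hc
    have := (List.all_eq_true.mp hdom) c hc
    exact asciiChar_bounds c this
  cases hcs : s.toList with
  | nil => simp [pvDecodeWhile_zero]
  | cons c cs =>
      have hc := hall c (by rw [hcs]; simp)
      have hrest : ∀ d ∈ cs, d.toNat < 256 := by
        intro d hd; exact (hall d (by rw [hcs]; simp [hd])).2
      simp only [List.foldl_cons, zero_mul, zero_add]
      rw [pvFold_decode cs hrest _ (by exact_mod_cast hc.1),
          pvDecodeWhile_single c hc.1 hc.2]
      have hbytes : ∀ d ∈ (c :: cs), [Char.ofNat (d.toNat / 256), Char.ofNat (d.toNat % 256)]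
          = [Char.ofNat 0, d] := by
        intro d hd
        have hd' := hall d (by rw [hcs]; exact hd)
        have h1 : d.toNat / 256 = 0 := Nat.div_eq_of_lt hd'.2
        have h2 : d.toNat % 256 = d.toNat := Nat.mod_eq_of_lt hd'.2
        rw [h1, h2, Char.ofNat_toNat]
      have hflat : (c :: cs).flatMap
            (fun d => [Char.ofNat (d.toNat / 256), Char.ofNat (d.toNat % 256)])
          = (c :: cs).flatMap (fun d => [Char.ofNat 0, d]) := by
        simp only [List.flatMap_def]
        rw [List.map_congr_left hbytes]
      rw [hflat]
      simp only [List.flatMap_cons, List.cons_append, List.nil_append,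
        List.dropWhile_cons]
      have hz : ((Char.ofNat 0 == Char.ofNat 0) : Bool) = true := by decide
      have hcne : ((c == Char.ofNat 0) : Bool) = false := by
        simp only [beq_eq_false_iff_ne, ne_eq]
        intro he
        have := congrArg Char.toNat he
        simp at this
        omega
      rw [hz, hcne]
      simp
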